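-- pv_equiv track=rewrite | github.com/shiveshsky/datastructures | contest_III/powerfull_array.py | solve
-- ===== SOURCE A (Python) =====
-- def solve(A, B):
--     A.sort()
--     B.sort()
--     sumA = 0
--     sumB = 0
--     for i in range(0, len(A)):
--         if A[i] < B[i]:
--             sumB+=B[i]-A[i]
--         elif A[i]>B[i]:
--             sumA+=A[i]-B[i]
--     return 0 if sumB>sumA else 1
-- ===== SOURCE B (Python) =====
-- def solve(A, B):
--     A.sort()
--     B.sort()
--     sumA = sum(A)
--     sumB = sum(B[i] for i in range(len(A)))
--     return 0 if sumB > sumA else 1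
-- ===== Notes on version B (the rewrite author's own statement) =====
-- stated objective: simpler
-- what changed: Replaces the per-element two-branch excess accumulation with a direct comparison of sum(A) against the sum of B's first len(A) elements, which is equivalent because the two conditional excesses always differ by exactly B[i]-A[i].
import Mathlib
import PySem

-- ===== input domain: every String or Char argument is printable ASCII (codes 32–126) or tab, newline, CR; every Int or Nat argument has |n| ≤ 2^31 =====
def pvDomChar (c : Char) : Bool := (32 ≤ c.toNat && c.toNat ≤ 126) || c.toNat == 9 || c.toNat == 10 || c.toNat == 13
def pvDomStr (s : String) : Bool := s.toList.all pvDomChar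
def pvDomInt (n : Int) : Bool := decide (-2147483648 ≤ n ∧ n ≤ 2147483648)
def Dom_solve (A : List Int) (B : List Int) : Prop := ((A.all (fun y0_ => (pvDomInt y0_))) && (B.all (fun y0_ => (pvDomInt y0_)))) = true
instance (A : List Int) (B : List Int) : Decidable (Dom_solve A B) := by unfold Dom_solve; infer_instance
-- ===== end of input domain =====

-- B replaces the per-element two-branch excess accumulation by a direct comparison of
-- sum(A) with the sum of B's first len(A) elements (simpler, same O(n log n) cost).
-- Both A and B sort the caller's lists in place; the theorems here are about the return value.

-- ===== PORT A =====
def solve (A : List Int) (B : List Int) : Int :=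
  let As := PySem.List.sorted A (fun x => x) false
  let Bs := PySem.List.sorted B (fun x => x) false
  let s := (PySem.List.pyRange 0 (PySem.List.len As) 1).foldl
    (fun (p : Int × Int) i =>
      if PySem.List.pyGetD As i 0 < PySem.List.pyGetD Bs i 0 then
        (p.1, p.2 + (PySem.List.pyGetD Bs i 0 - PySem.List.pyGetD As i 0))
      else if PySem.List.pyGetD As i 0 > PySem.List.pyGetD Bs i 0 then
        (p.1 + (PySem.List.pyGetD As i 0 - PySem.List.pyGetD Bs i 0), p.2)
      else p) (0, 0)
  if s.2 > s.1 then 0 else 1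

-- ===== PORT B =====
def solve_alt (A : List Int) (B : List Int) : Int :=
  let As := PySem.List.sorted A (fun x => x) false
  let Bs := PySem.List.sorted B (fun x => x) false
  let sumA := As.sum
  let sumB := ((PySem.List.pyRange 0 (PySem.List.len As) 1).map
      (fun i => PySem.List.pyGetD Bs i 0)).sum
  if sumB > sumA then 0 else 1

-- ===== PRECONDITION & SPEC =====
-- Pre_ excludes len(B) < len(A), where the index loop of A (and B's generator) raises IndexError.
def Pre_solve (A : List Int) (B : List Int) : Prop := A.length ≤ B.length
instance (A : List Int) (B : List Int) : Decidable (Pre_solve A B) := by unfold Pre_solve; infer_instance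
def pvWitness_solve : List Int × List Int := ([2, 1], [3, 0, 5])

def Spec_solve (A : List Int) (B : List Int) (out : Int) : Prop := out = solve_alt A B
instance (A : List Int) (B : List Int) (out : Int) : Decidable (Spec_solve A B out) := by unfold Spec_solve; infer_instance

-- ===== CLAIM (what is proved, stated in full; the proofs are below) =====
def Claim_equal_solve : Prop := ∀ (A : List Int) (B : List Int), Dom_solve A B → Pre_solve A B → Spec_solve A B (solve A B)

-- ===== LEMMAS AND PROOFS =====

-- the loop body of A's port, after the pyRange/pyGetD indices have been cast to Nat
def pvStep (xs ys : List Int) (p : Int × Int) (k : Nat) : Int × Int :=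
  if xs.getD k 0 < ys.getD k 0 then (p.1, p.2 + (ys.getD k 0 - xs.getD k 0))
  else if xs.getD k 0 > ys.getD k 0 then (p.1 + (xs.getD k 0 - ys.getD k 0), p.2)
  else p

-- loop invariant: the gap sumB - sumA is the sum of the pointwise differences
lemma pvStep_inv (xs ys : List Int) (n : Nat) (p : Int × Int) :
    ((List.range n).foldl (pvStep xs ys) p).2 - ((List.range n).foldl (pvStep xs ys) p).1
      = p.2 - p.1 + ((List.range n).map (fun i => ys.getD i 0)).sum
                  - ((List.range n).map (fun i => xs.getD i 0)).sum := by
  induction n generalizing p with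
  | zero => simp
  | succ n ih =>
    rw [List.range_succ, List.foldl_append, List.map_append, List.map_append,
        List.sum_append, List.sum_append]
    simp only [List.foldl_cons, List.foldl_nil, List.map_cons, List.map_nil, List.sum_cons,
      List.sum_nil]
    have h := ih p
    set q := List.foldl (pvStep xs ys) p (List.range n) with hq
    unfold pvStep
    split_ifs <;> (try dsimp only) <;> omega

lemma pvSum_getD (xs : List Int) :
    ((List.range xs.length).map (fun i => xs.getD i 0)).sum = xs.sum := by
  congr 1
  apply List.ext_getElem
  · simp
  · intro i h1 h2
    simp [List.getD_eq_getElem?_getD, h2]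

-- ===== VERDICT (by name: the statement is the Claim_ definition above) =====
theorem solve_spec : Claim_equal_solve := by
  intro A B _ _
  show solve A B = solve_alt A B
  unfold solve solve_alt
  set xs := PySem.List.sorted A (fun x => x) false with hxs
  set ys := PySem.List.sorted B (fun x => x) false with hys
  simp only [PySem.List.len_eq, PySem.List.pyRange_zero_nat, List.foldl_map, List.map_map,
    Function.comp_def, PySem.List.pyGetD_natCast]
  have hinv := pvStep_inv xs ys xs.length (0, 0)
  have hsum := pvSum_getD xs
  have hstep : (fun (p : Int × Int) (k : Nat) =>
      if xs.getD k 0 < ys.getD k 0 then (p.1, p.2 + (ys.getD k 0 - xs.getD k 0))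
      else if xs.getD k 0 > ys.getD k 0 then (p.1 + (xs.getD k 0 - ys.getD k 0), p.2)
      else p) = pvStep xs ys := by
    funext p k; simp [pvStep]
  rw [hstep]
  set q := (List.range xs.length).foldl (pvStep xs ys) (0, 0) with hq
  have : q.2 - q.1 = ((List.range xs.length).map (fun i => ys.getD i 0)).sum - xs.sum := by
    rw [hinv, hsum]; ring
  split_ifs with h1 h2 h2 <;> first | rfl | (exfalso; omega)
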